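-- pv_equiv track=rewrite | github.com/mistermingming/artificial_intelligence | mp1/scripts/run_multiple_ghost.py | create_maze_array
-- ===== SOURCE A (Python) =====
-- def populate_array_from_lines(maze_rows, maze_ra, isDot):
--     """Populates an array given string rows of equal length.
--
--     Assumes that each string row in the list of rows contains the same
--     number of characters. One character is assigned to each location
--     in the array. The given array is assumed to have the correct row
--     and column lengths.
--
--     Args:
--         maze_rows: The list of lines representing the rows of the
--             maze.
--         maze_ra: The array to write the characters of the maze to.
--         isDot: if the goal of this maze is to eat up dots instead of finding exit
--     Returns:
--         maze_ra: The populated array.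
--         start: The (r,c) coordinates of 'P', the start point.
--         end: The (r,c) coordinates of '.', the end point.
--         dots: a non-empty array if the goal is to eat dots, else an empty array
--     """
--     r_idx = c_idx = 0
--     start = end = ()
--     ghost_start = []
--     dots = []
--     walls = []
--     for row in maze_rows:
--         row = row.strip()
--         for c in row:
--             if c == '%':
--                 walls.append((r_idx, c_idx))
--             elif c == 'P':
--                 start = (r_idx, c_idx)
--             elif c == '.':
--                 dots.append((r_idx, c_idx))
--             elif c == 'G':
--                 ghost_start.append((r_idx, c_idx))
--             maze_ra[r_idx][c_idx] = c
--             c_idx += 1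
--         # Reset all the way to the left, move down one row.
--         c_idx = 0
--         r_idx += 1
--     return maze_ra, start, dots, ghost_start, walls
--
-- def create_maze_array(maze_rows, isDot):
--     """Creates an array to contain the characters in a maze.
--
--     Characters in the maze are to be referenced by coordinates (r,c),
--     where r is the number of rows from the top to go down, and c is
--     the number of columns from the left to go right.
--
--     Args:
--         maze_rows: The list of lines representing the rows of the
--             maze.
--
--     Returns:
--         maze_ra: The array populated with the maze characters.
--         start: The (r,c) coordinates of 'P', the start point.
--         end: The (r,c) coordinates of '.', the end point.
--     """
--     if maze_rows == []:
--         return []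
--     row_len = len(maze_rows[0].strip()) # i.e. #columns
--     col_len = len(maze_rows) # i.e. #rows
--     # Let array coordinates be (#rows down, #cols right).
--     maze_ra = [['' for r in range(row_len)] for c in range(col_len)]
--     maze_ra, start, end, ghost_start, dots = populate_array_from_lines(maze_rows, maze_ra, isDot)
--     return maze_ra, start, end, ghost_start, dots
-- ===== SOURCE B (Python) =====
-- def create_maze_array(maze_rows, isDot):
--     if maze_rows == []:
--         return []
--     row_len = len(maze_rows[0].strip())
--     grid = [['' for _ in range(row_len)] for _ in maze_rows]
--     for r, row in enumerate(maze_rows):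
--         for c, ch in enumerate(row.strip()):
--             grid[r][c] = ch
--     def scan(m):
--         return [(r, c) for r, grow in enumerate(grid) for c, v in enumerate(grow) if v == m]
--     ps = scan('P')
--     start = ps[-1] if ps else ()
--     return grid, start, scan('.'), scan('G'), scan('%')
-- ===== Notes on version B (the rewrite author's own statement) =====
-- stated objective: alternative
-- what changed: A fuses grid mutation and marker collection into one pass with hand-maintained r_idx/c_idx counters; B first builds the grid with enumerate-driven fills, then extracts start (last 'P') and the dot/ghost/wall coordinate lists in separate row-major comprehension scans over the finished grid.
-- outside the precondition, e.g. on create_maze_array([], True): A returns (), B returns (); on create_maze_array(['P', 'P%%'], True): A raises IndexError, B raises IndexError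
import Mathlib
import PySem

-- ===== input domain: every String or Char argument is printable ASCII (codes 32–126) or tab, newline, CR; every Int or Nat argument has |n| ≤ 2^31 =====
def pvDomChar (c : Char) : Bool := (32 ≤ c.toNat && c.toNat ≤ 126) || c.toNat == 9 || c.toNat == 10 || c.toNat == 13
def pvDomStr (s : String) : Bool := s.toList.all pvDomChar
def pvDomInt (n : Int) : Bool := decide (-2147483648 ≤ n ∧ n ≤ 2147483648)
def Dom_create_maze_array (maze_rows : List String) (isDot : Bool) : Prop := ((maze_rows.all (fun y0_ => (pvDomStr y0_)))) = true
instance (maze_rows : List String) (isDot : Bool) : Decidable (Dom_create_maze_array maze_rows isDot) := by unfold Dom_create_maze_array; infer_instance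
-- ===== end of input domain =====

-- B replaces A's fused populate pass (hand-maintained r_idx/c_idx counters updating grid and
-- marker lists at once) by: build the grid first, then separate row-major scans for start/dots/ghosts/walls.

-- ===== PORT A =====
-- state of populate_array_from_lines: (maze_ra, start, dots, ghost_start, walls); start none = Python's ()
structure PvStA where
  grid  : List (List String)
  start : Option (Int × Int)
  dots  : List (Int × Int)
  ghost : List (Int × Int)
  walls : List (Int × Int)
deriving Repr, DecidableEq

-- inner 'for c in row' loop of populate_array_from_lines; maze_ra[r_idx][c_idx] = c raises IndexError
-- when c_idx ≥ row length (excluded by Pre_) — List.set is a no-op there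
def pvRowA (r c : Nat) (cs : List Char) (s : PvStA) : PvStA :=
  match cs with
  | [] => s
  | ch :: rest =>
    let s1 : PvStA :=
      if ch = '%' then { s with walls := s.walls ++ [((r:Int), (c:Int))] }
      else if ch = 'P' then { s with start := some ((r:Int), (c:Int)) }
      else if ch = '.' then { s with dots := s.dots ++ [((r:Int), (c:Int))] }
      else if ch = 'G' then { s with ghost := s.ghost ++ [((r:Int), (c:Int))] }
      else s
    pvRowA r (c+1) rest { s1 with grid := s1.grid.set r ((s1.grid.getD r []).set c (String.ofList [ch])) }

-- outer 'for row in maze_rows' loop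
def pvRowsA (r : Nat) (rows : List String) (s : PvStA) : PvStA :=
  match rows with
  | [] => s
  | row :: rest => pvRowsA (r+1) rest (pvRowA r 0 (PySem.Chars.strip row.toList) s)

def create_maze_array (maze_rows : List String) (isDot : Bool) : List (List String) × (Int × Int) × (List (Int × Int)) × (List (Int × Int)) × (List (Int × Int)) :=
  match maze_rows with
  | [] => ([], (0, 0), [], [], [])   -- Python returns the bare list [] here: not a value of this type (excluded by Pre_)
  | r0 :: _ =>
    let row_len := (PySem.Chars.strip r0.toList).length
    let col_len := maze_rows.length
    let maze_ra := List.replicate col_len (List.replicate row_len "")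
    let s := pvRowsA 0 maze_rows ⟨maze_ra, none, [], [], []⟩
    -- start = () when the maze has no 'P': not a value of (Int × Int) (excluded by Pre_)
    (s.grid, s.start.getD (0, 0), s.dots, s.ghost, s.walls)

-- ===== PORT B =====
-- inner 'for c, ch in enumerate(row.strip())' fill; grid[r][c] = ch (IndexError excluded by Pre_, no-op here)
def pvFillRowB (g : List (List String)) (r c : Nat) (cs : List Char) : List (List String) :=
  match cs with
  | [] => g
  | ch :: rest => pvFillRowB (g.set r ((g.getD r []).set c (String.ofList [ch]))) r (c+1) rest

-- 'for r, row in enumerate(maze_rows)'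
def pvFillB (g : List (List String)) (r : Nat) (rows : List String) : List (List String) :=
  match rows with
  | [] => g
  | row :: rest => pvFillB (pvFillRowB g r 0 (PySem.Chars.strip row.toList)) (r+1) rest

-- scan(m) = [(r, c) for r, grow in enumerate(grid) for c, v in enumerate(grow) if v == m]
def pvScanB (grid : List (List String)) (m : String) : List (Int × Int) :=
  (PySem.List.enumerate grid 0).flatMap (fun rr =>
    (PySem.List.enumerate rr.2 0).filterMap (fun cv =>
      if cv.2 = m then some (rr.1, cv.1) else none))

def create_maze_array_alt (maze_rows : List String) (isDot : Bool) : List (List String) × (Int × Int) × (List (Int × Int)) × (List (Int × Int)) × (List (Int × Int)) :=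
  match maze_rows with
  | [] => ([], (0, 0), [], [], [])   -- Python B returns [] here, as A does: not a value of this type (excluded by Pre_)
  | r0 :: _ =>
    let row_len := (PySem.Chars.strip r0.toList).length
    let grid := pvFillB (List.replicate maze_rows.length (List.replicate row_len "")) 0 maze_rows
    let ps := pvScanB grid "P"
    -- ps[-1] if ps else (): () when no 'P' is excluded by Pre_
    (grid, (ps.getLast?).getD (0, 0), pvScanB grid ".", pvScanB grid "G", pvScanB grid "%")

-- ===== PRECONDITION & SPEC =====
-- Pre_ excludes inputs on which Python A returns a non-tuple-typed value: the empty list (A returns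
-- the bare list []), mazes whose stripped rows are longer than the first stripped row (IndexError),
-- and mazes without a 'P' (A returns start = (), the empty tuple, instead of an (r, c) pair).
def Pre_create_maze_array (maze_rows : List String) (isDot : Bool) : Prop :=
  maze_rows ≠ [] ∧
  (∀ row ∈ maze_rows, (PySem.Chars.strip row.toList).length ≤ (PySem.Chars.strip (maze_rows.headD "").toList).length) ∧
  (∃ row ∈ maze_rows, 'P' ∈ row.toList)
instance (maze_rows : List String) (isDot : Bool) : Decidable (Pre_create_maze_array maze_rows isDot) := by unfold Pre_create_maze_array; infer_instance

def pvWitness_create_maze_array : List String × Bool := (["%P.", "%G."], true)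

def Spec_create_maze_array (maze_rows : List String) (isDot : Bool) (out : List (List String) × (Int × Int) × (List (Int × Int)) × (List (Int × Int)) × (List (Int × Int))) : Prop := out = create_maze_array_alt maze_rows isDot
instance (maze_rows : List String) (isDot : Bool) (out : List (List String) × (Int × Int) × (List (Int × Int)) × (List (Int × Int)) × (List (Int × Int))) : Decidable (Spec_create_maze_array maze_rows isDot out) := by unfold Spec_create_maze_array; infer_instance

-- ===== CLAIM =====
def Claim_equal_create_maze_array : Prop := ∀ (maze_rows : List String) (isDot : Bool), Dom_create_maze_array maze_rows isDot → Pre_create_maze_array maze_rows isDot → Spec_create_maze_array maze_rows isDot (create_maze_array maze_rows isDot)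


-- ===== LEMMAS AND PROOFS =====

-- proof-side helpers: per-row / whole-maze marker positions and last-'P' position
def pvMarks (r c : Nat) (cs : List Char) (m : Char) : List (Int × Int) :=
  match cs with
  | [] => []
  | ch :: t => (if ch = m then [((r:Int), (c:Int))] else []) ++ pvMarks r (c+1) t m

def pvLastP (r c : Nat) (cs : List Char) : Option (Int × Int) :=
  match cs with
  | [] => none
  | ch :: t => (pvLastP r (c+1) t).or (if ch = 'P' then some ((r:Int), (c:Int)) else none)

def pvMarksRows (r : Nat) (rows : List String) (m : Char) : List (Int × Int) :=
  match rows with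
  | [] => []
  | row :: rest => pvMarks r 0 (PySem.Chars.strip row.toList) m ++ pvMarksRows (r+1) rest m

def pvLastPRows (r : Nat) (rows : List String) : Option (Int × Int) :=
  match rows with
  | [] => none
  | row :: rest => (pvLastPRows (r+1) rest).or (pvLastP r 0 (PySem.Chars.strip row.toList))

-- sequential in-place writes into one row, and the padded row they produce
def pvWriteRow (orig : List String) (c : Nat) (cs : List Char) : List String :=
  match cs with
  | [] => orig
  | ch :: t => pvWriteRow (orig.set c (String.ofList [ch])) (c+1) t

def pvPadRow (L : Nat) (row : String) : List String :=
  (PySem.Chars.strip row.toList).map (fun ch => String.ofList [ch]) ++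
    List.replicate (L - (PySem.Chars.strip row.toList).length) ""

theorem pvSing_inj (ch mc : Char) : (String.ofList [ch] = String.ofList [mc]) ↔ ch = mc := by
  constructor
  · intro h; have := congrArg String.toList h; simpa using this
  · intro h; rw [h]

theorem pvRowA_decomp : ∀ (cs : List Char) (r c : Nat) (s : PvStA),
    pvRowA r c cs s = ⟨pvFillRowB s.grid r c cs, (pvLastP r c cs).or s.start,
      s.dots ++ pvMarks r c cs '.', s.ghost ++ pvMarks r c cs 'G', s.walls ++ pvMarks r c cs '%'⟩ := by
  intro cs
  induction cs with
  | nil => intro r c s; cases s; simp [pvRowA, pvFillRowB, pvLastP, pvMarks]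
  | cons ch rest ih =>
    intro r c s; cases s with
    | mk g st d gh w =>
      by_cases h1 : ch = '%'
      · subst h1; simp [pvRowA, pvFillRowB, pvLastP, pvMarks, ih]
      · by_cases h2 : ch = 'P'
        · subst h2; simp [pvRowA, pvFillRowB, pvLastP, pvMarks, ih]
        · by_cases h3 : ch = '.'
          · subst h3; simp [pvRowA, pvFillRowB, pvLastP, pvMarks, ih]
          · by_cases h4 : ch = 'G'
            · subst h4; simp [pvRowA, pvFillRowB, pvLastP, pvMarks, ih]
            · simp [pvRowA, pvFillRowB, pvLastP, pvMarks, ih, h1, h2, h3, h4]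

theorem pvRowsA_decomp : ∀ (rows : List String) (r : Nat) (s : PvStA),
    pvRowsA r rows s = ⟨pvFillB s.grid r rows, (pvLastPRows r rows).or s.start,
      s.dots ++ pvMarksRows r rows '.', s.ghost ++ pvMarksRows r rows 'G', s.walls ++ pvMarksRows r rows '%'⟩ := by
  intro rows
  induction rows with
  | nil => intro r s; cases s; simp [pvRowsA, pvFillB, pvLastPRows, pvMarksRows]
  | cons row rest ih =>
    intro r s; cases s
    simp [pvRowsA, pvFillB, pvLastPRows, pvMarksRows, pvRowA_decomp, ih, Option.or_assoc]

theorem pvWriteRow_spec : ∀ (cs : List Char) (L : Nat) (pre : List String), cs.length ≤ L →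
    pvWriteRow (pre ++ List.replicate L "") pre.length cs
      = pre ++ cs.map (fun ch => String.ofList [ch]) ++ List.replicate (L - cs.length) "" := by
  intro cs
  induction cs with
  | nil => intro L pre _; simp [pvWriteRow]
  | cons ch t ih =>
    intro L pre hL
    cases L with
    | zero => simp at hL
    | succ L0 =>
      have hset : (pre ++ List.replicate (L0+1) ("":String)).set pre.length (String.ofList [ch])
          = (pre ++ [String.ofList [ch]]) ++ List.replicate L0 "" := by
        rw [List.set_append_right] <;> simp [List.replicate_succ]
      have hlen : (pre ++ [String.ofList [ch]]).length = pre.length + 1 := by simp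
      calc pvWriteRow (pre ++ List.replicate (L0+1) "") pre.length (ch :: t)
          = pvWriteRow ((pre ++ [String.ofList [ch]]) ++ List.replicate L0 "") (pre ++ [String.ofList [ch]]).length t := by
            rw [pvWriteRow, hset, hlen]
        _ = (pre ++ [String.ofList [ch]]) ++ t.map (fun ch => String.ofList [ch]) ++ List.replicate (L0 - t.length) "" := by
            exact ih L0 (pre ++ [String.ofList [ch]]) (by simp only [List.length_cons] at hL; omega)
        _ = pre ++ (ch :: t).map (fun ch => String.ofList [ch]) ++ List.replicate (L0 + 1 - (t.length + 1)) "" := by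
            simp

theorem pvFillRowB_eq_set : ∀ (cs : List Char) (g : List (List String)) (r c : Nat), r < g.length →
    pvFillRowB g r c cs = g.set r (pvWriteRow (g.getD r []) c cs) := by
  intro cs
  induction cs with
  | nil => intro g r c h; simp [pvFillRowB, pvWriteRow, List.getD_eq_getElem?_getD, List.getElem?_eq_getElem h]
  | cons ch t ih =>
    intro g r c h
    rw [pvFillRowB, ih _ r (c+1) (by simpa using h), List.set_set]
    have : (g.set r ((g.getD r []).set c (String.ofList [ch]))).getD r [] = (g.getD r []).set c (String.ofList [ch]) := by
      simp [List.getD_eq_getElem?_getD, List.getElem?_set_self h]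
    rw [this, pvWriteRow]

theorem pvFillB_spec : ∀ (rows : List String) (L : Nat) (pre : List (List String)),
    (∀ row ∈ rows, (PySem.Chars.strip row.toList).length ≤ L) →
    pvFillB (pre ++ List.replicate rows.length (List.replicate L "")) pre.length rows
      = pre ++ rows.map (pvPadRow L) := by
  intro rows
  induction rows with
  | nil => intro L pre _; simp [pvFillB]
  | cons row rest ih =>
    intro L pre hfit
    rw [pvFillB, List.length_cons, List.replicate_succ]
    have hlt : pre.length < (pre ++ List.replicate L ("":String) :: List.replicate rest.length (List.replicate L "")).length := by
      simp
    rw [pvFillRowB_eq_set _ _ _ _ hlt]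
    have hgetD : (pre ++ List.replicate L ("":String) :: List.replicate rest.length (List.replicate L "")).getD pre.length []
        = List.replicate L "" := by
      rw [List.getD_eq_getElem?_getD, List.getElem?_append_right (le_refl _)]
      simp
    have hwrite := pvWriteRow_spec (PySem.Chars.strip row.toList) L [] (hfit row (by simp))
    simp only [List.nil_append, List.length_nil] at hwrite
    rw [hgetD, hwrite]
    rw [show (List.map (fun ch => String.ofList [ch]) (PySem.Chars.strip row.toList) ++ List.replicate (L - (PySem.Chars.strip row.toList).length) "") = pvPadRow L row from rfl]
    have hset : (pre ++ List.replicate L ("":String) :: List.replicate rest.length (List.replicate L "")).set pre.length (pvPadRow L row)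
        = (pre ++ [pvPadRow L row]) ++ List.replicate rest.length (List.replicate L "") := by
      rw [List.set_append_right] <;> simp
    rw [hset]
    have hlen : pre.length + 1 = (pre ++ [pvPadRow L row]).length := by simp
    rw [hlen, ih L (pre ++ [pvPadRow L row]) (fun r hr => hfit r (by simp [hr]))]
    simp

theorem pvScan_replicate : ∀ (k : Nat) (i : Int) (mc : Char) (r : Int),
    (PySem.List.enumerate (List.replicate k ("":String)) i).filterMap
      (fun cv => if cv.2 = String.ofList [mc] then some (r, cv.1) else none) = [] := by
  intro k
  induction k with
  | zero => intro i mc r; simp [PySem.List.enumerate_nil]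
  | succ n ih => intro i mc r; simp [List.replicate_succ, PySem.List.enumerate_cons, ih]

theorem pvScan_row : ∀ (cs : List Char) (r cI k : Nat) (mc : Char),
    (PySem.List.enumerate (cs.map (fun ch => String.ofList [ch]) ++ List.replicate k "") (cI:Int)).filterMap
      (fun cv => if cv.2 = String.ofList [mc] then some ((r:Int), cv.1) else none) = pvMarks r cI cs mc := by
  intro cs
  induction cs with
  | nil => intro r cI k mc; simp [pvMarks, pvScan_replicate]
  | cons ch t ih =>
    intro r cI k mc
    rw [pvMarks]
    by_cases h : ch = mc
    · subst h
      simp [PySem.List.enumerate_cons, ← ih r (cI+1) k, Nat.cast_add]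
    · simp [PySem.List.enumerate_cons, pvSing_inj, h, ← ih r (cI+1) k, Nat.cast_add]

theorem pvScan_rows : ∀ (rows : List String) (L : Nat) (r : Nat) (mc : Char),
    (PySem.List.enumerate (rows.map (pvPadRow L)) (r:Int)).flatMap
      (fun rr => (PySem.List.enumerate rr.2 0).filterMap
        (fun cv => if cv.2 = String.ofList [mc] then some (rr.1, cv.1) else none))
      = pvMarksRows r rows mc := by
  intro rows
  induction rows with
  | nil => intro L r mc; simp [pvMarksRows, PySem.List.enumerate_nil]
  | cons row rest ih =>
    intro L r mc
    rw [pvMarksRows]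
    have h0 := pvScan_row (PySem.Chars.strip row.toList) r 0 (L - (PySem.Chars.strip row.toList).length) mc
    simp only [Nat.cast_zero] at h0
    simp [PySem.List.enumerate_cons, pvPadRow, h0, ← ih L (r+1) mc, Nat.cast_add]

theorem pvMarks_getLast : ∀ (cs : List Char) (r c : Nat),
    (pvMarks r c cs 'P').getLast? = pvLastP r c cs := by
  intro cs
  induction cs with
  | nil => intro r c; simp [pvMarks, pvLastP]
  | cons ch t ih =>
    intro r c
    rw [pvMarks, pvLastP, List.getLast?_append, ih]
    by_cases h : ch = 'P' <;> simp [h]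

theorem pvMarksRows_getLast : ∀ (rows : List String) (r : Nat),
    (pvMarksRows r rows 'P').getLast? = pvLastPRows r rows := by
  intro rows
  induction rows with
  | nil => intro r; simp [pvMarksRows, pvLastPRows]
  | cons row rest ih =>
    intro r
    rw [pvMarksRows, pvLastPRows, List.getLast?_append, ih, pvMarks_getLast]

theorem pvScanB_pad (rows : List String) (L : Nat) (mc : Char) :
    pvScanB (rows.map (pvPadRow L)) (String.ofList [mc]) = pvMarksRows 0 rows mc := by
  have h := pvScan_rows rows L 0 mc
  simp only [Nat.cast_zero] at h
  simpa [pvScanB] using h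

-- ===== VERDICT =====
theorem create_maze_array_spec : Claim_equal_create_maze_array := by
  unfold Claim_equal_create_maze_array
  intro maze_rows isDot _ hpre
  unfold Spec_create_maze_array
  obtain ⟨hne, hfit, -⟩ := hpre
  cases maze_rows with
  | nil => exact absurd rfl hne
  | cons r0 rest =>
    have hfill : pvFillB (List.replicate (r0 :: rest).length (List.replicate (PySem.Chars.strip r0.toList).length "")) 0 (r0 :: rest)
        = (r0 :: rest).map (pvPadRow (PySem.Chars.strip r0.toList).length) := by
      have h := pvFillB_spec (r0 :: rest) (PySem.Chars.strip r0.toList).length []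
        (fun row hr => by simpa using hfit row hr)
      simpa using h
    simp only [create_maze_array, create_maze_array_alt, pvRowsA_decomp, hfill]
    rw [show ("P":String) = String.ofList ['P'] from rfl, show (".":String) = String.ofList ['.'] from rfl,
        show ("G":String) = String.ofList ['G'] from rfl, show ("%":String) = String.ofList ['%'] from rfl]
    simp only [pvScanB_pad, pvMarksRows_getLast, Option.or_none, List.nil_append]
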